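-- pv_equiv track=rewrite | github.com/achoruzy/ProjectEuler | 0062_Cubic_permutations.py | cube_generator
-- ===== SOURCE A (Python) =====
-- def cube_generator(lenght: int) -> list:
--     '''Generates lists of cubes <x^3> of specified number of digits
--
--     params:
--         lenght: int -> number of digits for cubes
--
--     returns:
--         list of cubes of specified number of digits
--     '''
--     result = []
--
--     iter = 1
--     while True:
--         cube = iter ** 3
--         cube_str_len = len(str(cube))
--         if cube_str_len == lenght:
--             result.append(cube)
--         elif cube_str_len > lenght:
--             break
--         iter += 1
--
--     return result
-- ===== SOURCE B (Python) =====
-- def _icbrt(x):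
--     """Floor cube root of x >= 0, by doubling then binary search (exact integers)."""
--     hi = 1
--     while hi ** 3 <= x:
--         hi *= 2
--     lo = 0
--     while hi - lo > 1:
--         mid = (lo + hi) // 2
--         if mid ** 3 <= x:
--             lo = mid
--         else:
--             hi = mid
--     return lo
--
--
-- def cube_generator(lenght: int) -> list:
--     if lenght < 1:
--         return []
--     lo = _icbrt(10 ** (lenght - 1) - 1) + 1
--     hi = _icbrt(10 ** lenght - 1)
--     return [n ** 3 for n in range(lo, hi + 1)]
-- ===== Notes on version B (the rewrite author's own statement) =====
-- stated objective: faster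
-- what changed: Instead of scanning all cubes from 1**3 upward and measuring each via str(), B computes the exact base range [lo, hi] with an integer binary-search cube root of the decimal bounds and emits the cubes directly.
import Mathlib
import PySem

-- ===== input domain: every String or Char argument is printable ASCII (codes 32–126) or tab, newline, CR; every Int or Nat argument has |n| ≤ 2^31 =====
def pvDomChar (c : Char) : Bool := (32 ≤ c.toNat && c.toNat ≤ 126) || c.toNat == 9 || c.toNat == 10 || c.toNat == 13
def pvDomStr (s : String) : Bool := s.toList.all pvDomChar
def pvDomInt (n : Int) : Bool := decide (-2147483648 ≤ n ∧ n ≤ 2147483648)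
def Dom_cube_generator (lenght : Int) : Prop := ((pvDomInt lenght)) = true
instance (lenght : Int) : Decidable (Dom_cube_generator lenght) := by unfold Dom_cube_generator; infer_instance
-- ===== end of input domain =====

-- B replaces A's scan of every cube from 1**3 upward (a str() per candidate) by an integer
-- binary-search cube root of the decimal bounds, emitting the in-range cubes directly.

-- ===== PORT A =====
-- while True: cube = iter**3; if len(str(cube)) == lenght: append; elif > lenght: break; iter += 1
-- (fuel is a totality guard only: cube_generator passes 10^lenght.toNat + 2, more steps than the
--  loop can take, since the loop breaks before iter can pass 10^max(lenght,0); the proofs below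
--  show the fuel-0 branch is never the returned value on any input)
def cubeLoop (fuel : Nat) (lenght iter : Int) (result : List Int) : List Int :=
  match fuel with
  | 0 => result
  | fuel + 1 =>
    if PySem.Str.len (PySem.Int.toStr (iter ^ 3)) = lenght then
      cubeLoop fuel lenght (iter + 1) (result ++ [iter ^ 3])
    else if PySem.Str.len (PySem.Int.toStr (iter ^ 3)) > lenght then result
    else cubeLoop fuel lenght (iter + 1) result

def cube_generator (lenght : Int) : List Int :=
  cubeLoop (10 ^ lenght.toNat + 2) lenght 1 []

-- ===== PORT B =====
-- while hi**3 <= x: hi *= 2   (fuel is a totality guard only: hi ≥  1 grows by at least 1 per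
--  step and the loop runs only while hi ≤ hi³ ≤ x, so x.toNat + 1 steps always suffice)
def growHi (fuel : Nat) (x hi : Int) : Int :=
  match fuel with
  | 0 => hi
  | f + 1 => if hi ^ 3 ≤ x then growHi f x (2 * hi) else hi

-- while hi - lo > 1: mid = (lo+hi)//2; if mid**3 <= x: lo = mid else: hi = mid
-- (fuel guard: hi - lo shrinks every step, so (hi - lo).toNat steps suffice)
def bsearch (fuel : Nat) (x lo hi : Int) : Int :=
  match fuel with
  | 0 => lo
  | f + 1 =>
    if hi - lo > 1 then
      if (PySem.Int.floordiv (lo + hi) 2) ^ 3 ≤ x then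
        bsearch f x (PySem.Int.floordiv (lo + hi) 2) hi
      else
        bsearch f x lo (PySem.Int.floordiv (lo + hi) 2)
    else lo

def icbrt (x : Int) : Int :=
  bsearch (growHi (x.toNat + 1) x 1).toNat x 0 (growHi (x.toNat + 1) x 1)

-- [n**3 for n in range(lo, hi+1)] with lo = _icbrt(10**(lenght-1)-1)+1, hi = _icbrt(10**lenght-1)
def cube_generator_alt (lenght : Int) : List Int :=
  if lenght < 1 then []
  else
    (PySem.List.pyRange (icbrt ((10 : Int) ^ (lenght - 1).toNat - 1) + 1)
        (icbrt ((10 : Int) ^ lenght.toNat - 1) + 1) 1).map (fun n => n ^ 3)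

-- ===== PRECONDITION & SPEC =====
def Spec_cube_generator (lenght : Int) (out : List Int) : Prop := out = cube_generator_alt lenght
instance (lenght : Int) (out : List Int) : Decidable (Spec_cube_generator lenght out) := by unfold Spec_cube_generator; infer_instance

-- ===== CLAIM (what is proved, stated in full; the proofs are below) =====
def Claim_equal_cube_generator : Prop := ∀ (lenght : Int), Dom_cube_generator lenght → Spec_cube_generator lenght (cube_generator lenght)

-- ===== LEMMAS AND PROOFS =====

lemma pvSelf_le_cube {a : Int} (h : 1 ≤ a) : a ≤ a ^ 3 := by
  nlinarith [mul_nonneg (mul_nonneg (by omega : (0:Int) ≤ a) (by omega : (0:Int) ≤ a - 1)) (by omega : (0:Int) ≤ a + 1)]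

lemma pvToDigitsCore_length (fuel n : Nat) (l : List Char) (h : n < fuel) :
    (Nat.toDigitsCore 10 fuel n l).length = l.length + Nat.log 10 n + 1 := by
  induction fuel generalizing n l with
  | zero => omega
  | succ f ih =>
    simp only [Nat.toDigitsCore]
    by_cases h10 : n / 10 = 0
    · have hn : n < 10 := by omega
      simp [h10, Nat.log_eq_zero_iff.mpr (Or.inl hn)]
    · have hn : 10 ≤ n := by
        by_contra hc
        exact h10 (Nat.div_eq_of_lt (by omega))
      rw [if_neg h10, ih (n / 10) _ (by
        have := Nat.div_lt_self (by omega : 0 < n) (by norm_num : 1 < 10)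
        omega)]
      have hlog : Nat.log 10 (n / 10) = Nat.log 10 n - 1 := Nat.log_div_base 10 n
      have hpos : 0 < Nat.log 10 n := Nat.log_pos (by norm_num) hn
      simp only [List.length_cons]
      omega

-- str-length of a positive integer, via Nat.log
lemma pvDigitLen (m : Int) (hm : 1 ≤ m) :
    PySem.Str.len (PySem.Int.toStr m) = (Nat.log 10 m.toNat : Int) + 1 := by
  rw [PySem.Str.len_eq, PySem.Int.toList_toStr]
  unfold PySem.Int.toChars
  rw [if_neg (by omega)]
  unfold Nat.toDigits
  rw [pvToDigitsCore_length _ _ _ (Nat.lt_succ_self _)]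
  simp

-- bracket form: for m ≥ 1, str-length ≤ L ↔ m < 10^L
lemma pvDigitLen_le_iff (m : Int) (hm : 1 ≤ m) (L : Nat) :
    (PySem.Str.len (PySem.Int.toStr m) ≤ (L : Int)) ↔ m < (10 : Int) ^ L := by
  rw [pvDigitLen m hm]
  have hm0 : m.toNat ≠ 0 := by omega
  have hcast : ((10 ^ L : Nat) : Int) = (10 : Int) ^ L := by push_cast; rfl
  have key : Nat.log 10 m.toNat + 1 ≤ L ↔ m.toNat < 10 ^ L := by
    constructor
    · intro h
      by_contra hc
      have hpl : (10 : Nat) ^ L ≤ m.toNat := by omega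
      have : L ≤ Nat.log 10 m.toNat := (Nat.le_log_iff_pow_le (by norm_num) hm0).mpr hpl
      omega
    · intro h
      by_contra hc
      have hll : L ≤ Nat.log 10 m.toNat := by omega
      have : (10 : Nat) ^ L ≤ m.toNat := (Nat.le_log_iff_pow_le (by norm_num) hm0).mp hll
      omega
  omega

lemma pvCube_le_cube {a b : Int} (h : a ≤ b) : a ^ 3 ≤ b ^ 3 := by
  nlinarith [sq_nonneg (a + b), sq_nonneg a, sq_nonneg b, sq_nonneg (a - b)]

lemma growHi_spec : ∀ (fuel : Nat) (x hi : Int), 1 ≤ hi → x - hi < (fuel : Int) →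
    1 ≤ growHi fuel x hi ∧ x < (growHi fuel x hi) ^ 3 := by
  intro fuel
  induction fuel with
  | zero =>
    intro x hi h1 hf
    have := pvSelf_le_cube h1
    simp only [growHi]
    constructor
    · exact h1
    · simp at hf; omega
  | succ f ih =>
    intro x hi h1 hf
    simp only [growHi]
    by_cases hc : hi ^ 3 ≤ x
    · rw [if_pos hc]
      exact ih x (2 * hi) (by omega) (by push_cast at hf ⊢; omega)
    · rw [if_neg hc]
      exact ⟨h1, by omega⟩

lemma bsearch_spec : ∀ (fuel : Nat) (x lo hi : Int), lo ^ 3 ≤ x → x < hi ^ 3 →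
    hi - lo ≤ (fuel : Int) →
    lo ≤ bsearch fuel x lo hi ∧ (bsearch fuel x lo hi) ^ 3 ≤ x ∧ x < (bsearch fuel x lo hi + 1) ^ 3 := by
  intro fuel
  induction fuel with
  | zero =>
    intro x lo hi hlo hhi hf
    simp only [bsearch]
    refine ⟨le_refl _, hlo, ?_⟩
    simp at hf
    exact lt_of_lt_of_le hhi (pvCube_le_cube (by omega))
  | succ f ih =>
    intro x lo hi hlo hhi hf
    simp only [bsearch]
    by_cases hgap : hi - lo > 1
    · rw [if_pos hgap]
      have hmidb : lo < PySem.Int.floordiv (lo + hi) 2 ∧ PySem.Int.floordiv (lo + hi) 2 < hi := by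
        rw [PySem.Int.floordiv_eq_ediv_of_pos (by norm_num)]
        omega
      by_cases hmid : (PySem.Int.floordiv (lo + hi) 2) ^ 3 ≤ x
      · rw [if_pos hmid]
        have := ih x (PySem.Int.floordiv (lo + hi) 2) hi hmid hhi (by push_cast at hf ⊢; omega)
        exact ⟨le_trans (by omega) this.1, this.2⟩
      · rw [if_neg hmid]
        exact ih x lo (PySem.Int.floordiv (lo + hi) 2) hlo (by omega) (by push_cast at hf ⊢; omega)
    · rw [if_neg hgap]
      refine ⟨le_refl _, hlo, ?_⟩
      exact lt_of_lt_of_le hhi (pvCube_le_cube (by omega))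

lemma icbrt_spec (x : Int) (hx : 0 ≤ x) :
    0 ≤ icbrt x ∧ (icbrt x) ^ 3 ≤ x ∧ x < (icbrt x + 1) ^ 3 := by
  unfold icbrt
  have hg := growHi_spec (x.toNat + 1) x 1 (by norm_num) (by push_cast; omega)
  exact bsearch_spec _ x 0 _ (by norm_num; omega) hg.2 (by have := hg.1; omega)

-- the base bounds B computes, as abbreviations for the proofs
def pvLO (lenght : Int) : Int := icbrt ((10 : Int) ^ (lenght - 1).toNat - 1) + 1
def pvHI (lenght : Int) : Int := icbrt ((10 : Int) ^ lenght.toNat - 1)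

lemma pvPow_nonneg (k : Nat) : (0 : Int) ≤ (10 : Int) ^ k - 1 := by
  have : (1 : Int) ≤ 10 ^ k := one_le_pow₀ (by norm_num)
  omega

lemma pvLO_pos (lenght : Int) : 1 ≤ pvLO lenght := by
  have := icbrt_spec ((10 : Int) ^ (lenght - 1).toNat - 1) (pvPow_nonneg _)
  unfold pvLO
  omega

lemma pvHI_lt_pow (lenght : Int) : pvHI lenght < (10 : Int) ^ lenght.toNat := by
  have h := icbrt_spec ((10 : Int) ^ lenght.toNat - 1) (pvPow_nonneg _)
  have hp : (1 : Int) ≤ 10 ^ lenght.toNat := one_le_pow₀ (by norm_num)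
  unfold pvHI
  by_contra hc
  have := pvCube_le_cube (show (10 : Int) ^ lenght.toNat ≤ icbrt ((10 : Int) ^ lenght.toNat - 1) by omega)
  have hcube : (10 : Int) ^ lenght.toNat ≤ ((10 : Int) ^ lenght.toNat) ^ 3 := pvSelf_le_cube (by omega)
  omega

-- n lies in B's base range iff n³ has exactly `lenght` digits; above it iff more digits
lemma pvDigits_cmp (lenght : Int) (hl : 1 ≤ lenght) (n : Int) (hn : 1 ≤ n) :
    (PySem.Str.len (PySem.Int.toStr (n ^ 3)) = lenght ↔ pvLO lenght ≤ n ∧ n ≤ pvHI lenght)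
    ∧ (PySem.Str.len (PySem.Int.toStr (n ^ 3)) > lenght ↔ pvHI lenght < n) := by
  have hcube : (1 : Int) ≤ n ^ 3 := le_trans hn (pvSelf_le_cube hn)
  have hE : ((lenght - 1).toNat : Int) = lenght - 1 := by omega
  have hL : (lenght.toNat : Int) = lenght := by omega
  have hlow : (PySem.Str.len (PySem.Int.toStr (n ^ 3)) ≤ lenght - 1) ↔ n ^ 3 < (10 : Int) ^ (lenght - 1).toNat := by
    rw [← hE]; exact pvDigitLen_le_iff (n ^ 3) hcube _
  have hhigh : (PySem.Str.len (PySem.Int.toStr (n ^ 3)) ≤ lenght) ↔ n ^ 3 < (10 : Int) ^ lenght.toNat := by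
    rw [← hL]; exact pvDigitLen_le_iff (n ^ 3) hcube _
  have hLOs := icbrt_spec ((10 : Int) ^ (lenght - 1).toNat - 1) (pvPow_nonneg _)
  have hHIs := icbrt_spec ((10 : Int) ^ lenght.toNat - 1) (pvPow_nonneg _)
  have hLOiff : (10 : Int) ^ (lenght - 1).toNat ≤ n ^ 3 ↔ pvLO lenght ≤ n := by
    unfold pvLO
    constructor
    · intro hge
      by_contra hc
      have hle : n ≤ icbrt ((10 : Int) ^ (lenght - 1).toNat - 1) := by omega
      have := pvCube_le_cube hle
      omega
    · intro hge
      have := pvCube_le_cube hge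
      have h2 := hLOs.2.2
      calc (10 : Int) ^ (lenght - 1).toNat ≤ (icbrt ((10 : Int) ^ (lenght - 1).toNat - 1) + 1) ^ 3 := by omega
        _ ≤ n ^ 3 := this
  have hHIiff : n ^ 3 < (10 : Int) ^ lenght.toNat ↔ n ≤ pvHI lenght := by
    unfold pvHI
    constructor
    · intro hlt
      by_contra hc
      have hle : icbrt ((10 : Int) ^ lenght.toNat - 1) + 1 ≤ n := by omega
      have := pvCube_le_cube hle
      have h2 := hHIs.2.2
      omega
    · intro hle
      have := pvCube_le_cube hle
      have h1 := hHIs.2.1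
      omega
  constructor
  · constructor
    · intro heq
      exact ⟨hLOiff.mp (by have := hlow.not; omega), hHIiff.mp (hhigh.mp (by omega))⟩
    · intro ⟨h1, h2⟩
      have ha : ¬ (PySem.Str.len (PySem.Int.toStr (n ^ 3)) ≤ lenght - 1) := by
        rw [hlow]; have := hLOiff.mpr h1; omega
      have hb : PySem.Str.len (PySem.Int.toStr (n ^ 3)) ≤ lenght := hhigh.mpr (hHIiff.mpr h2)
      omega
  · constructor
    · intro hgt
      have : ¬ n ^ 3 < (10 : Int) ^ lenght.toNat := by
        rw [← hhigh]; omega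
      by_contra hc
      exact this (hHIiff.mpr (by omega))
    · intro hlt
      have : ¬ n ^ 3 < (10 : Int) ^ lenght.toNat := by
        intro hc
        have := hHIiff.mp hc
        omega
      rw [← hhigh] at this
      omega

lemma cubeLoop_succ (f : Nat) (l i : Int) (r : List Int) :
    cubeLoop (f + 1) l i r =
      if PySem.Str.len (PySem.Int.toStr (i ^ 3)) = l then cubeLoop f l (i + 1) (r ++ [i ^ 3])
      else if PySem.Str.len (PySem.Int.toStr (i ^ 3)) > l then r
      else cubeLoop f l (i + 1) r := rfl

lemma cubeLoop_eq (lenght : Int) (hl : 1 ≤ lenght) :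
    ∀ (fuel : Nat) (iter : Int) (res : List Int), 1 ≤ iter →
      pvHI lenght + 2 - iter ≤ (fuel : Int) →
      cubeLoop fuel lenght iter res =
        res ++ (PySem.List.pyRange (max iter (pvLO lenght)) (pvHI lenght + 1) 1).map (fun n => n ^ 3) := by
  intro fuel
  induction fuel with
  | zero =>
    intro iter res hiter hfuel
    have hm : iter ≤ max iter (pvLO lenght) := le_max_left _ _
    have hempty : PySem.List.pyRange (max iter (pvLO lenght)) (pvHI lenght + 1) 1 = [] := by
      apply List.eq_nil_of_length_eq_zero
      rw [PySem.List.length_pyRange_one]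
      simp at hfuel
      omega
    simp [cubeLoop, hempty]
  | succ f ih =>
    intro iter res hiter hfuel
    have hcmp := pvDigits_cmp lenght hl iter hiter
    simp only [cubeLoop]
    by_cases heq : PySem.Str.len (PySem.Int.toStr (iter ^ 3)) = lenght
    · rw [if_pos heq]
      have hin := hcmp.1.mp heq
      rw [ih (iter + 1) (res ++ [iter ^ 3]) (by omega) (by push_cast at hfuel ⊢; omega)]
      rw [max_eq_left hin.1, max_eq_left (by omega : pvLO lenght ≤ iter + 1)]
      rw [PySem.List.pyRange_one_cons (by omega : iter < pvHI lenght + 1)]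
      simp
    · rw [if_neg heq]
      by_cases hgt : PySem.Str.len (PySem.Int.toStr (iter ^ 3)) > lenght
      · rw [if_pos hgt]
        have hhi := hcmp.2.mp hgt
        have hm : iter ≤ max iter (pvLO lenght) := le_max_left _ _
        have hempty : PySem.List.pyRange (max iter (pvLO lenght)) (pvHI lenght + 1) 1 = [] := by
          apply List.eq_nil_of_length_eq_zero
          rw [PySem.List.length_pyRange_one]
          omega
        simp [hempty]
      · rw [if_neg hgt]
        have hlt : iter < pvLO lenght := by
          have h1 : iter ≤ pvHI lenght := by
            by_contra hc
            exact hgt (hcmp.2.mpr (by omega))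
          by_contra hc
          exact heq (hcmp.1.mpr ⟨by omega, h1⟩)
        rw [ih (iter + 1) res (by omega) (by push_cast at hfuel ⊢; omega)]
        rw [max_eq_right (by omega : iter ≤ pvLO lenght),
            max_eq_right (by omega : iter + 1 ≤ pvLO lenght)]

-- ===== VERDICT (by name: the statement is the Claim_ definition above) =====
theorem cube_generator_spec : Claim_equal_cube_generator := by
  intro lenght _
  unfold Spec_cube_generator cube_generator cube_generator_alt
  by_cases hl : lenght < 1
  · rw [if_pos hl]
    have hd : PySem.Str.len (PySem.Int.toStr ((1 : Int) ^ 3)) = 1 := by decide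
    rw [show (10 : Nat) ^ lenght.toNat + 2 = (10 ^ lenght.toNat + 1) + 1 from rfl, cubeLoop_succ, hd,
        if_neg (by omega), if_pos (by omega)]
  · rw [if_neg hl]
    have hfuel : pvHI lenght + 2 - 1 ≤ ((10 ^ lenght.toNat + 2 : Nat) : Int) := by
      have := pvHI_lt_pow lenght
      have hcast : ((10 ^ lenght.toNat : Nat) : Int) = (10 : Int) ^ lenght.toNat := by push_cast; rfl
      push_cast
      omega
    rw [cubeLoop_eq lenght (by omega) (10 ^ lenght.toNat + 2) 1 [] (by norm_num) hfuel,
        max_eq_right (pvLO_pos lenght)]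
    rfl
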